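-- pv_equiv track=rewrite | github.com/w-a-s-d-q-w-e-r/COMP2090SEF-Group-Project-on-Data-Structure-and-Algorithm | trie.py | _difference_in_order
-- ===== SOURCE A (Python) =====
-- def _difference_in_order(search_word, w):
--     i = j = 0
--     mismatch = 0
--     while i < len(search_word) and j < len(w):
--         if search_word[i] != w[j]:
--             if i + 1 >= len(search_word) or j + 1 >= len(w):
--                 return False
--             elif search_word[i+1] != w[j] or search_word[i] != w[j+1]:
--                 return False
--             mismatch = mismatch + 1
--             if mismatch > 1:
--                 return False
--             i += 2
--             j += 2
--         else:
--             i += 1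
--             j += 1
--     return True
-- ===== SOURCE B (Python) =====
-- def _difference_in_order(search_word, w):
--     n = min(len(search_word), len(w))
--     diffs = [k for k in range(n) if search_word[k] != w[k]]
--     if not diffs:
--         return True
--     if len(diffs) != 2:
--         return False
--     m, m2 = diffs
--     return m2 == m + 1 and search_word[m+1] == w[m] and search_word[m] == w[m+1]
-- ===== Notes on version B (the rewrite author's own statement) =====
-- stated objective: alternative
-- what changed: Replaced the inline greedy two-pointer loop with skip-by-two and a mismatch counter by a two-phase pass: build the list of differing positions up to the min length, then classify it (empty, or exactly two consecutive positions forming a transposition).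
import Mathlib
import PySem

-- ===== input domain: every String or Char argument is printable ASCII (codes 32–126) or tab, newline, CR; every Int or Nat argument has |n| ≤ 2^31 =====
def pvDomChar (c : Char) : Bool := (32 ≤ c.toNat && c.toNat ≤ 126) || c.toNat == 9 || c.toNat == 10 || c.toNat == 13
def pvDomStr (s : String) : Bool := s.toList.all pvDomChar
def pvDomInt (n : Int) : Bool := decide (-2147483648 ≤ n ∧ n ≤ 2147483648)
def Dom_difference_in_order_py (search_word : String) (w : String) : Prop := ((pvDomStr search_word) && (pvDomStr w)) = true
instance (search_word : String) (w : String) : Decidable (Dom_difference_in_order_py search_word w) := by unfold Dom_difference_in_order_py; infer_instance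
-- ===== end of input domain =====

-- B replaces A's inline greedy skip-by-two loop by a build-the-diff-list-then-classify
-- two-phase pass (alternative decomposition, same linear cost).

-- ===== PORT A =====
-- literal port of A's while loop: indices i, j and a mismatch counter
def diffLoopA (sl wl : List Char) (i j mismatch : Nat) : Bool :=
  if hi : i < sl.length then
    if hj : j < wl.length then
      if sl[i] ≠ wl[j] then
        if h2 : i + 1 < sl.length ∧ j + 1 < wl.length then
          if sl[i+1] ≠ wl[j] ∨ sl[i] ≠ wl[j+1] then false
          else if mismatch + 1 > 1 then false
          else diffLoopA sl wl (i+2) (j+2) (mismatch+1)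
        else false
      else diffLoopA sl wl (i+1) (j+1) mismatch
    else true
  else true
termination_by sl.length - i

def difference_in_order_py (search_word : String) (w : String) : Bool :=
  diffLoopA search_word.toList w.toList 0 0 0

-- ===== PORT B =====
def difference_in_order_py_alt (search_word : String) (w : String) : Bool :=
  let sl := search_word.toList
  let wl := w.toList
  let n := min sl.length wl.length
  let diffs := (List.range n).filter (fun k => sl.getD k ' ' != wl.getD k ' ')
  match diffs with
  | [] => true
  | [m, m2] => m2 == m + 1 && sl.getD (m+1) ' ' == wl.getD m ' ' && sl.getD m ' ' == wl.getD (m+1) ' '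
  | _ => false

-- ===== PRECONDITION & SPEC =====
def Spec_difference_in_order_py (search_word : String) (w : String) (out : Bool) : Prop := out = difference_in_order_py_alt search_word w
instance (search_word : String) (w : String) (out : Bool) : Decidable (Spec_difference_in_order_py search_word w out) := by unfold Spec_difference_in_order_py; infer_instance

-- ===== CLAIM (what is proved, stated in full; the proofs are below) =====
def Claim_equal_difference_in_order_py : Prop := ∀ (search_word : String) (w : String), Dom_difference_in_order_py search_word w → Spec_difference_in_order_py search_word w (difference_in_order_py search_word w)

-- ===== LEMMAS AND PROOFS =====

-- the list of differing positions from i up to n = min length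
def diffsFrom (sl wl : List Char) (i : Nat) : List Nat :=
  (List.range' i (min sl.length wl.length - i)).filter
    (fun k => sl.getD k ' ' != wl.getD k ' ')

-- B's classifier as applied to a diff list starting anywhere
def classify0 (sl wl : List Char) (ds : List Nat) : Bool :=
  match ds with
  | [] => true
  | [m, m2] => m2 == m + 1 && sl.getD (m+1) ' ' == wl.getD m ' ' && sl.getD m ' ' == wl.getD (m+1) ' '
  | _ => false

lemma diffsFrom_step (sl wl : List Char) (i : Nat)
    (h : i < min sl.length wl.length) :
    diffsFrom sl wl i =
      (if sl.getD i ' ' != wl.getD i ' ' then [i] else []) ++ diffsFrom sl wl (i+1) := by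
  unfold diffsFrom
  have h1 : min sl.length wl.length - i = (min sl.length wl.length - (i+1)) + 1 := by omega
  rw [h1, List.range'_succ, List.filter_cons]
  split <;> simp

lemma diffsFrom_end (sl wl : List Char) (i : Nat)
    (h : ¬ i < min sl.length wl.length) :
    diffsFrom sl wl i = [] := by
  unfold diffsFrom
  have : min sl.length wl.length - i = 0 := by omega
  simp [this]

lemma diffLoopA_done (sl wl : List Char) (i j m : Nat)
    (h : ¬(i < sl.length ∧ j < wl.length)) : diffLoopA sl wl i j m = true := by
  rw [diffLoopA.eq_def]
  by_cases hi : i < sl.length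
  · have hj : ¬ j < wl.length := by tauto
    simp [hi, hj]
  · simp [hi]

lemma loop_main (sl wl : List Char) : ∀ fuel i, min sl.length wl.length - i ≤ fuel →
    (diffLoopA sl wl i i 0 = classify0 sl wl (diffsFrom sl wl i)) ∧
    (diffLoopA sl wl i i 1 = (diffsFrom sl wl i).isEmpty) := by
  intro fuel
  induction fuel with
  | zero =>
    intro i hfe
    have hend : ¬ i < min sl.length wl.length := by omega
    rw [diffsFrom_end sl wl i hend]
    have hout : ¬(i < sl.length ∧ i < wl.length) := by omega
    rw [diffLoopA_done sl wl i i 0 hout, diffLoopA_done sl wl i i 1 hout]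
    simp [classify0]
  | succ f ih =>
    intro i hfe
    by_cases hlt : i < min sl.length wl.length
    · have hi : i < sl.length := by omega
      have hj : i < wl.length := by omega
      have hs0 : sl[i]? = some (sl[i]) := List.getElem?_eq_getElem hi
      have hw0 : wl[i]? = some (wl[i]) := List.getElem?_eq_getElem hj
      rw [diffsFrom_step sl wl i hlt]
      by_cases hne : sl[i] = wl[i]
      · -- matching position: both step to i+1
        have hstep : ∀ m, diffLoopA sl wl i i m = diffLoopA sl wl (i+1) (i+1) m := by
          intro m
          conv_lhs => rw [diffLoopA.eq_def]
          simp [hi, hj, hne]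
        have hfilt : ¬ ((sl.getD i ' ' != wl.getD i ' ') = true) := by
          simp [List.getD, hs0, hw0, hne]
        rw [if_neg hfilt, List.nil_append]
        exact ⟨by rw [hstep]; exact (ih (i+1) (by omega)).1,
               by rw [hstep]; exact (ih (i+1) (by omega)).2⟩
      · -- mismatch at i
        have hfilt : (sl.getD i ' ' != wl.getD i ' ') = true := by
          simp [List.getD, hs0, hw0, hne]
        rw [if_pos hfilt, List.cons_append, List.nil_append]
        constructor
        · -- mismatch = 0 case
          by_cases hb : i + 1 < sl.length ∧ i + 1 < wl.length
          · have hs1 : sl[i+1]? = some (sl[i+1]'(hb.1)) := List.getElem?_eq_getElem hb.1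
            have hw1 : wl[i+1]? = some (wl[i+1]'(hb.2)) := List.getElem?_eq_getElem hb.2
            by_cases hsw : sl[i+1]'(hb.1) = wl[i] ∧ sl[i] = wl[i+1]'(hb.2)
            · -- valid transposition: A recurses with mismatch 1 at i+2
              have hor : ¬ (sl[i+1]'(hb.1) ≠ wl[i] ∨ sl[i] ≠ wl[i+1]'(hb.2)) := by
                simp [hsw.1, hsw.2]
              have hA : diffLoopA sl wl i i 0 = diffLoopA sl wl (i+2) (i+2) 1 := by
                conv_lhs => rw [diffLoopA.eq_def]
                simp [hi, hj, hne, hb, hor]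
              -- position i+1 also differs (chars are distinct)
              have hlt1 : i + 1 < min sl.length wl.length := by omega
              have hne1 : sl[i+1]'(hb.1) ≠ wl[i+1]'(hb.2) := by
                rw [hsw.1]; intro hc; exact hne (by rw [hsw.2, ← hc])
              have hfilt1 : (sl.getD (i+1) ' ' != wl.getD (i+1) ' ') = true := by
                simp [List.getD, hs1, hw1, hne1]
              rw [diffsFrom_step sl wl (i+1) hlt1, if_pos hfilt1, List.cons_append, List.nil_append]
              rw [hA, (ih (i+2) (by omega)).2]
              cases hds : diffsFrom sl wl (i+2) with
              | cons d ds => simp [classify0]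
              | nil =>
                simp [classify0, List.getD, hs0, hw0, hs1, hw1, hsw.1, hsw.2]
            · -- swap condition fails: A returns false; classifier rejects too
              have hA : diffLoopA sl wl i i 0 = false := by
                rw [diffLoopA.eq_def]
                simp only [hi, hj, hne, hb, dif_pos, ne_eq, not_false_eq_true, if_true, and_true]
                have : sl[i+1]'(hb.1) ≠ wl[i] ∨ sl[i] ≠ wl[i+1]'(hb.2) := by tauto
                rcases this with h1 | h1 <;> simp [h1]
              rw [hA]
              cases hds : diffsFrom sl wl (i+1) with
              | nil => simp [classify0]
              | cons d ds =>
                cases ds with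
                | cons d2 ds2 => simp [classify0]
                | nil =>
                  by_cases hd : d = i + 1
                  · subst hd
                    rcases not_and_or.mp hsw with h1 | h1 <;>
                      simp [classify0, List.getD, hs0, hw0, hs1, hw1, h1]
                  · simp [classify0, hd]
          · -- boundary: A returns false; i is the last position before n, diffs = [i]
            have hA : diffLoopA sl wl i i 0 = false := by
              rw [diffLoopA.eq_def]
              simp [hi, hj, hne, hb]
            have hend1 : ¬ i + 1 < min sl.length wl.length := by omega
            rw [hA, diffsFrom_end sl wl (i+1) hend1]
            simp [classify0]
        · -- mismatch = 1 case: any further mismatch makes A return false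
          have hA : diffLoopA sl wl i i 1 = false := by
            rw [diffLoopA.eq_def]
            by_cases hb : i + 1 < sl.length ∧ i + 1 < wl.length
            · simp only [hi, hj, hne, hb, dif_pos, ne_eq, not_false_eq_true, if_true, and_true]
              split <;> simp
            · simp [hi, hj, hne, hb]
          rw [hA]; simp
    · rw [diffsFrom_end sl wl i hlt]
      have hout : ¬(i < sl.length ∧ i < wl.length) := by omega
      rw [diffLoopA_done sl wl i i 0 hout, diffLoopA_done sl wl i i 1 hout]
      simp [classify0]

-- ===== VERDICT (by name: the statement is the Claim_ definition above) =====
theorem difference_in_order_py_spec : Claim_equal_difference_in_order_py := by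
  intro s w _
  unfold Spec_difference_in_order_py difference_in_order_py difference_in_order_py_alt
  have h := (loop_main s.toList w.toList (min s.toList.length w.toList.length) 0 (by omega)).1
  rw [h]
  have : diffsFrom s.toList w.toList 0 =
      (List.range (min s.toList.length w.toList.length)).filter
        (fun k => s.toList.getD k ' ' != w.toList.getD k ' ') := by
    unfold diffsFrom
    rw [List.range_eq_range']
    simp
  rw [this]
  rfl
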